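-- pv_equiv track=rewrite | github.com/liufly/memn2n | dialog2babi.py | convert_story
-- ===== SOURCE A (Python) =====
-- def time_feature(n):
--     return '<' + str(n) + '>'
--
-- def convert_story(story):
--     ret_stories = []
--     for idx, pair in enumerate(story):
--         user, bot = pair
--         if not bot:
--             continue
--         ret_story = []
--         for i in range(idx):
--             u, b = story[i]
--             ret_story.append(
--                 [time_feature(len(ret_story) + 1)]
-- #                 + [w.lower() if w != '<SILENCE>' else w for w in u]
--                 + u
--                 + ['<USER>']
--             )
--             if b:
--                 ret_story.append(
--                     [time_feature(len(ret_story) + 1)]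
-- #                     + [w.lower() if w != '<SILENCE>' else w for w in b]
--                     + b
--                     + ['<MODEL>']
--                 )
--         ret_stories.append((ret_story, user, bot))
--     return ret_stories
-- ===== SOURCE B (Python) =====
-- def time_feature(n):
--     return '<' + str(n) + '>'
--
-- def convert_story(story):
--     ret_stories = []
--     history = []
--     for user, bot in story:
--         if bot:
--             ret_stories.append((list(history), user, bot))
--         history.append([time_feature(len(history) + 1)] + user + ['<USER>'])
--         if bot:
--             history.append([time_feature(len(history) + 1)] + bot + ['<MODEL>'])
--     return ret_stories
-- ===== Notes on version B (the rewrite author's own statement) =====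
-- stated objective: alternative
-- what changed: Replaces the nested rebuild (for each bot turn, an inner range(idx) loop re-deriving the whole history from scratch) with a single pass that maintains one running history list and snapshots it before extending; total cost is dominated by the quadratic-size output either way.
import Mathlib
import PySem

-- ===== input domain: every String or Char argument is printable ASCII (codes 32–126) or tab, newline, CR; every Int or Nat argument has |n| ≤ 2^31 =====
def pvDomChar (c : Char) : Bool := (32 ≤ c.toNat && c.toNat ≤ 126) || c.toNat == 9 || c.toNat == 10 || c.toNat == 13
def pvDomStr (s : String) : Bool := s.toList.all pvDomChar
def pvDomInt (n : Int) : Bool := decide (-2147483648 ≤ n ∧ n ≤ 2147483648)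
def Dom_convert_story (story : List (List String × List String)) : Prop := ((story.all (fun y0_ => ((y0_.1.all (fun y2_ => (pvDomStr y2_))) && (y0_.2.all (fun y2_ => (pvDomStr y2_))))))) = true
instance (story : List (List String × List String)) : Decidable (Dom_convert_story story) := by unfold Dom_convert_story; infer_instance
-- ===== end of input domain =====

-- B replaces A's nested rebuild (inner range(idx) loop re-deriving the history from scratch for every bot turn)
-- with one pass maintaining a single running history, snapshotted before each extension (objective: alternative decomposition).

-- helper shared by both Python files (identical definition of time_feature in each)
def time_feature (n : Int) : String := "<" ++ PySem.Int.toStr n ++ ">"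

-- ===== PORT A =====
def convert_story (story : List (List String × List String)) : List (List (List String) × List String × List String) :=
  (PySem.List.enumerate story 0).foldl
    (fun ret_stories ip =>
      if ip.2.2 = [] then ret_stories
      else
        let ret_story := (PySem.List.pyRange 0 ip.1 1).foldl
          (fun rs i =>
            let ub := PySem.List.pyGetD story i ([], [])
            let rs := rs ++ [time_feature ((rs.length : Int) + 1) :: (ub.1 ++ ["<USER>"])]
            if ub.2 = [] then rs
            else rs ++ [time_feature ((rs.length : Int) + 1) :: (ub.2 ++ ["<MODEL>"])]) []
        ret_stories ++ [(ret_story, ip.2.1, ip.2.2)]) []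

-- ===== PORT B =====
def convert_story_alt (story : List (List String × List String)) : List (List (List String) × List String × List String) :=
  (story.foldl
    (fun acc pr =>
      let ret := if pr.2 = [] then acc.1 else acc.1 ++ [(acc.2, pr.1, pr.2)]
      let hist := acc.2 ++ [time_feature ((acc.2.length : Int) + 1) :: (pr.1 ++ ["<USER>"])]
      let hist := if pr.2 = [] then hist else hist ++ [time_feature ((hist.length : Int) + 1) :: (pr.2 ++ ["<MODEL>"])]
      (ret, hist))
    ([], [])).1

-- ===== PRECONDITION & SPEC =====
def Spec_convert_story (story : List (List String × List String)) (out : List (List (List String) × List String × List String)) : Prop := out = convert_story_alt story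
instance (story : List (List String × List String)) (out : List (List (List String) × List String × List String)) : Decidable (Spec_convert_story story out) := by unfold Spec_convert_story; infer_instance

-- ===== CLAIM (what is proved, stated in full; the proofs are below) =====
def Claim_equal_convert_story : Prop := ∀ (story : List (List String × List String)), Dom_convert_story story → Spec_convert_story story (convert_story story)

-- ===== LEMMAS AND PROOFS =====

-- named copies of A's two loop bodies and of B's loop body (definitionally equal to the ports' lambdas)
def aInner (story : List (List String × List String)) (rs : List (List String)) (i : Int) : List (List String) :=
  let ub := PySem.List.pyGetD story i ([], [])
  let rs := rs ++ [time_feature ((rs.length : Int) + 1) :: (ub.1 ++ ["<USER>"])]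
  if ub.2 = [] then rs
  else rs ++ [time_feature ((rs.length : Int) + 1) :: (ub.2 ++ ["<MODEL>"])]

def aOuter (story : List (List String × List String))
    (ret_stories : List (List (List String) × List String × List String))
    (ip : Int × (List String × List String)) : List (List (List String) × List String × List String) :=
  if ip.2.2 = [] then ret_stories
  else ret_stories ++ [((PySem.List.pyRange 0 ip.1 1).foldl (aInner story) [], ip.2.1, ip.2.2)]

def bStep (acc : List (List (List String) × List String × List String) × List (List String))
    (pr : List String × List String) :
    List (List (List String) × List String × List String) × List (List String) :=
  let ret := if pr.2 = [] then acc.1 else acc.1 ++ [(acc.2, pr.1, pr.2)]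
  let hist := acc.2 ++ [time_feature ((acc.2.length : Int) + 1) :: (pr.1 ++ ["<USER>"])]
  let hist := if pr.2 = [] then hist else hist ++ [time_feature ((hist.length : Int) + 1) :: (pr.2 ++ ["<MODEL>"])]
  (ret, hist)

-- the history built from the first n pairs of s (A's inner loop)
def build (s : List (List String × List String)) (n : Int) : List (List String) :=
  (PySem.List.pyRange 0 n 1).foldl (aInner s) []

theorem convert_story_eq (story : List (List String × List String)) :
    convert_story story = (PySem.List.enumerate story 0).foldl (aOuter story) [] := rfl

theorem convert_story_alt_eq (story : List (List String × List String)) :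
    convert_story_alt story = (story.foldl bStep ([], [])).1 := rfl

theorem aInner_prefix (xs ys : List (List String × List String)) (rs : List (List String)) (i : Int)
    (h0 : 0 ≤ i) (h : i < (xs.length : Int)) : aInner (xs ++ ys) rs i = aInner xs rs i := by
  have h1 : i < ((xs ++ ys).length : Int) := by simp; omega
  have key : PySem.List.pyGetD (xs ++ ys) i (([], []) : List String × List String)
      = PySem.List.pyGetD xs i ([], []) := by
    rw [PySem.List.pyGetD_eq_getElem (xs ++ ys) ([], []) h0 h1,
        PySem.List.pyGetD_eq_getElem xs ([], []) h0 h]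
    exact List.getElem_append_left _
  unfold aInner
  rw [key]

theorem build_prefix (xs ys : List (List String × List String)) (n : Int)
    (hn : n ≤ (xs.length : Int)) : build (xs ++ ys) n = build xs n := by
  unfold build
  apply PySem.List.foldl_congr_mem
  intro acc i hi
  have := (PySem.List.mem_pyRange_one).1 hi
  exact aInner_prefix xs ys acc i this.1 (lt_of_lt_of_le this.2 hn)

theorem build_append_last (xs : List (List String × List String)) (x : List String × List String) :
    build (xs ++ [x]) ((xs.length : Int) + 1) = aInner (xs ++ [x]) (build xs (xs.length : Int)) (xs.length : Int) := by
  unfold build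
  rw [PySem.List.pyRange_one_succ_right (by positivity), List.foldl_append]
  simp only [List.foldl_cons, List.foldl_nil]
  congr 1
  exact build_prefix xs [x] _ le_rfl

theorem getD_append_last (xs : List (List String × List String)) (x : List String × List String) :
    PySem.List.pyGetD (xs ++ [x]) (xs.length : Int) ([], []) = x := by
  rw [PySem.List.pyGetD_natCast]
  simp [List.getD]

theorem main_invariant (xs : List (List String × List String)) :
    xs.foldl bStep ([], []) = ((PySem.List.enumerate xs 0).foldl (aOuter xs) [], build xs (xs.length : Int)) := by
  induction xs using List.reverseRecOn with
  | nil => rfl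
  | append_singleton xs x ih =>
    rw [List.foldl_append, ih]
    have houter : (PySem.List.enumerate (xs ++ [x]) 0).foldl (aOuter (xs ++ [x])) []
        = (PySem.List.enumerate xs 0).foldl (aOuter (xs ++ [x])) [] ++
          (if x.2 = [] then [] else [(build (xs ++ [x]) (xs.length : Int), x.1, x.2)]) := by
      rw [PySem.List.enumerate_append, List.foldl_append]
      simp only [PySem.List.enumerate_cons, PySem.List.enumerate_nil, List.foldl_cons, List.foldl_nil]
      unfold aOuter
      simp only [zero_add]
      split_ifs <;> simp [build]
    have hcongr : (PySem.List.enumerate xs 0).foldl (aOuter (xs ++ [x])) []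
        = (PySem.List.enumerate xs 0).foldl (aOuter xs) [] := by
      apply PySem.List.foldl_congr_mem
      intro acc ip hip
      obtain ⟨k, hk, rfl⟩ := (PySem.List.mem_enumerate_iff _ _ _).1 hip
      unfold aOuter
      have hfold : List.foldl (aInner (xs ++ [x])) [] (PySem.List.pyRange 0 (0 + (k : Int)))
          = List.foldl (aInner xs) [] (PySem.List.pyRange 0 (0 + (k : Int))) := by
        apply PySem.List.foldl_congr_mem
        intro acc2 i hi
        have hib := (PySem.List.mem_pyRange_one).1 hi
        exact aInner_prefix xs [x] acc2 i hib.1 (by omega)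
      simp only [hfold]
    have hbuild : build (xs ++ [x]) (((xs ++ [x]).length : Int))
        = aInner (xs ++ [x]) (build xs (xs.length : Int)) (xs.length : Int) := by
      have : (((xs ++ [x]).length : Int)) = (xs.length : Int) + 1 := by simp
      rw [this, build_append_last]
    rw [houter, hcongr, hbuild]
    have hpref : build (xs ++ [x]) (xs.length : Int) = build xs (xs.length : Int) :=
      build_prefix xs [x] _ le_rfl
    unfold bStep aInner
    rw [getD_append_last]
    rw [hpref]
    by_cases hx : x.2 = [] <;> simp [hx]

-- ===== VERDICT (by name: the statement is the Claim_ definition above) =====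
theorem convert_story_spec : Claim_equal_convert_story := by
  intro story _
  show convert_story story = convert_story_alt story
  rw [convert_story_eq, convert_story_alt_eq, main_invariant]
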